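-- pv_equiv track=rewrite | github.com/ExplorerDonutz/Comp-Sci-1026-Archive | Assign3/univRanking.py | nationalRank
-- ===== SOURCE A (Python) =====
-- def nationalRank(reader, selectedCountry):
--     unis = []
--     for row in reader:
--         if row[2].upper() == selectedCountry.upper():
--             unis.append(row)
--
--     # Find best rank
--     best = unis[0]
--
--     # Check all ranks in list
--     for i in range(1, len(unis)):
--         # If current rank is better (less than) than the best, replace best with this rank
--         if unis[i][3] < best[3]:
--             best = unis[i]
--
--     return f"At national rank => {best[3]} the university name is => {best[1].upper()}\n"
-- ===== SOURCE B (Python) =====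
-- def nationalRank(reader, selectedCountry):
--     target = selectedCountry.upper()
--     unis = [row for row in reader if row[2].upper() == target]
--     unis.sort(key=lambda row: row[3])
--     best = unis[0]
--     return f"At national rank => {best[3]} the university name is => {best[1].upper()}\n"
-- ===== Notes on version B (the rewrite author's own statement) =====
-- stated objective: idiomatic
-- what changed: Replaces the explicit index-based running-minimum loop with filter, a stable sort on the rank column, and picking the first element; stability reproduces A's first-occurrence tie-break and unis[0] still raises when no row matches.
import Mathlib
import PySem

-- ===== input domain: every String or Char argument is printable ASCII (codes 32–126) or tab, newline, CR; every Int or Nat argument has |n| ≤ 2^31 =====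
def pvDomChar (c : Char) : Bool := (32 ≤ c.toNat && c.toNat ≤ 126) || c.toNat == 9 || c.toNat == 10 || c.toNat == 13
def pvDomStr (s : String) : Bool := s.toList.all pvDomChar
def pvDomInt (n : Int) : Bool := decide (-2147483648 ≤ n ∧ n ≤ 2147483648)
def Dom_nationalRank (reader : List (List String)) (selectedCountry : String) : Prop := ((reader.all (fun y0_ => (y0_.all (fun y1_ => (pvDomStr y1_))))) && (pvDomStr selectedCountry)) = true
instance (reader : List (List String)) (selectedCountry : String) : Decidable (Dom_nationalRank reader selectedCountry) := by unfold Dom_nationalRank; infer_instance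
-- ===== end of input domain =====

-- B replaces A's index-based running-minimum loop by filter + stable sort on the rank
-- column + first element (more idiomatic, same exact result including first-occurrence ties).

-- ===== PORT A =====
def nationalRank (reader : List (List String)) (selectedCountry : String) : String :=
  let unis := reader.foldl (fun acc row =>
    if PySem.Str.upper (PySem.List.pyGetD row 2 "") = PySem.Str.upper selectedCountry
    then acc ++ [row] else acc) []
  let best0 := PySem.List.pyGetD unis 0 []
  let best := (PySem.List.pyRange 1 (PySem.List.len unis)).foldl (fun best i =>
    if PySem.List.pyGetD (PySem.List.pyGetD unis i []) 3 "" < PySem.List.pyGetD best 3 ""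
    then PySem.List.pyGetD unis i [] else best) best0
  "At national rank => " ++ PySem.List.pyGetD best 3 "" ++
    " the university name is => " ++ PySem.Str.upper (PySem.List.pyGetD best 1 "") ++ "\n"

-- ===== PORT B =====
def nationalRank_alt (reader : List (List String)) (selectedCountry : String) : String :=
  let target := PySem.Str.upper selectedCountry
  let unis := reader.filter (fun row => decide (PySem.Str.upper (PySem.List.pyGetD row 2 "") = target))
  let s := PySem.List.sorted unis (fun row => PySem.List.pyGetD row 3 "")
  let best := PySem.List.pyGetD s 0 []
  "At national rank => " ++ PySem.List.pyGetD best 3 "" ++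
    " the university name is => " ++ PySem.Str.upper (PySem.List.pyGetD best 1 "") ++ "\n"

-- ===== PRECONDITION & SPEC =====
-- Pre_ = exactly where the Python A returns: every row has a column 2 (length ≥ 3),
-- every row matching the selected country also has a rank column 3 (length ≥ 4),
-- and at least one row matches (otherwise unis[0] raises IndexError).
def Pre_nationalRank (reader : List (List String)) (selectedCountry : String) : Prop :=
  (∀ row ∈ reader, 3 ≤ row.length) ∧
  (∀ row ∈ reader, PySem.Str.upper (PySem.List.pyGetD row 2 "") = PySem.Str.upper selectedCountry → 4 ≤ row.length) ∧
  (∃ row ∈ reader, PySem.Str.upper (PySem.List.pyGetD row 2 "") = PySem.Str.upper selectedCountry)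
instance (reader : List (List String)) (selectedCountry : String) : Decidable (Pre_nationalRank reader selectedCountry) := by unfold Pre_nationalRank; infer_instance

def pvWitness_nationalRank : List (List String) × String := ([["1", "MIT", "USA", "1"]], "usa")

def Spec_nationalRank (reader : List (List String)) (selectedCountry : String) (out : String) : Prop := out = nationalRank_alt reader selectedCountry
instance (reader : List (List String)) (selectedCountry : String) (out : String) : Decidable (Spec_nationalRank reader selectedCountry out) := by unfold Spec_nationalRank; infer_instance

-- ===== CLAIM (what is proved, stated in full; the proofs are below) =====
def Claim_equal_nationalRank : Prop := ∀ (reader : List (List String)) (selectedCountry : String), Dom_nationalRank reader selectedCountry → Pre_nationalRank reader selectedCountry → Spec_nationalRank reader selectedCountry (nationalRank reader selectedCountry)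

-- ===== LEMMAS AND PROOFS =====

-- head of one stable insertion step = one min?-style step on the old head
theorem head?_insertBy_key {α κ : Type} [LT κ] [DecidableLT κ] (key : α → κ) (x : α) (ys : List α) :
    (PySem.List.insertBy (fun a b => decide (key a < key b)) x ys).head? =
      (match ys.head? with
        | none => some x
        | some m => if key x < key m then some x else some m) := by
  cases ys with
  | nil => simp [PySem.List.insertBy]
  | cons y t =>
      simp only [PySem.List.insertBy, List.head?_cons]
      by_cases h : key x < key y <;> simp [h]

theorem head?_foldl_insertBy {α κ : Type} [LT κ] [DecidableLT κ] (key : α → κ)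
    (xs : List α) (acc : List α) :
    (xs.foldl (fun acc x => PySem.List.insertBy (fun a b => decide (key a < key b)) x acc) acc).head? =
      xs.foldl (fun acc x =>
        match acc with
        | none => some x
        | some m => if key x < key m then some x else some m) acc.head? := by
  induction xs generalizing acc with
  | nil => rfl
  | cons x t ih =>
      rw [List.foldl_cons, List.foldl_cons, ih, head?_insertBy_key]

-- the head of sorted(xs, key) is exactly min(xs, key)'s first extremal element
theorem head?_sorted_eq_min? {α κ : Type} [LT κ] [DecidableLT κ] (key : α → κ) (xs : List α) :
    (PySem.List.sorted xs key).head? = PySem.List.min? xs key := by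
  rw [PySem.List.sorted_eq_foldl_insertBy, head?_foldl_insertBy]
  rfl

-- A's running-minimum loop over the tail computes min?'s first extremal element
theorem foldl_min_step {α κ : Type} [LT κ] [DecidableLT κ] (key : α → κ) (t : List α) (u : α) :
    t.foldl (fun acc x =>
        match acc with
        | none => some x
        | some m => if key x < key m then some x else some m) (some u) =
      some (t.foldl (fun m x => if key x < key m then x else m) u) := by
  induction t generalizing u with
  | nil => rfl
  | cons x t ih =>
      rw [List.foldl_cons, List.foldl_cons]
      by_cases h : key x < key u <;> simp [h, ih]

-- ===== VERDICT (by name: the statement is the Claim_ definition above) =====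
theorem nationalRank_spec : Claim_equal_nationalRank := by
  intro reader sc _ hpre
  obtain ⟨-, -, hex⟩ := hpre
  show nationalRank reader sc = nationalRank_alt reader sc
  unfold nationalRank nationalRank_alt
  simp only []
  set p : List String → Prop := fun row =>
    PySem.Str.upper (PySem.List.pyGetD row 2 "") = PySem.Str.upper sc with hp
  have hfold : reader.foldl (fun acc row =>
      if PySem.Str.upper (PySem.List.pyGetD row 2 "") = PySem.Str.upper sc
      then acc ++ [row] else acc) [] =
      reader.filter (fun row => decide (PySem.Str.upper (PySem.List.pyGetD row 2 "") = PySem.Str.upper sc)) := by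
    simpa using PySem.List.foldl_append_ite_eq_filter
      (p := fun row => PySem.Str.upper (PySem.List.pyGetD row 2 "") = PySem.Str.upper sc)
      (l := reader) (acc := [])
  rw [hfold]
  set unis := reader.filter (fun row => decide (PySem.Str.upper (PySem.List.pyGetD row 2 "") = PySem.Str.upper sc)) with hunis
  have hne : unis ≠ [] := by
    obtain ⟨r, hr, hpr⟩ := hex
    intro hnil
    have : r ∈ unis := by
      rw [hunis, List.mem_filter]
      exact ⟨hr, by simpa using hpr⟩
    rw [hnil] at this
    exact absurd this (List.not_mem_nil)
  obtain ⟨u, t, hut⟩ : ∃ u t, unis = u :: t := by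
    cases h : unis with
    | nil => exact absurd h hne
    | cons a b => exact ⟨a, b, rfl⟩
  rw [hut]
  -- A side: range loop = running minimum over the tail
  have hA : (PySem.List.pyRange 1 (PySem.List.len (u :: t))).foldl (fun best i =>
      if PySem.List.pyGetD (PySem.List.pyGetD (u :: t) i []) 3 "" < PySem.List.pyGetD best 3 ""
      then PySem.List.pyGetD (u :: t) i [] else best) (PySem.List.pyGetD (u :: t) 0 []) =
      t.foldl (fun m x =>
        if PySem.List.pyGetD x 3 "" < PySem.List.pyGetD m 3 "" then x else m)
        u := by
    have h1 : (0 : Int) ≤ 1 := by norm_num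
    have := PySem.List.foldl_pyRange_pyGetD (xs := u :: t) (d := [])
      (f := fun best x =>
        if PySem.List.pyGetD x 3 "" < PySem.List.pyGetD best 3 "" then x else best)
      (init := PySem.List.pyGetD (u :: t) 0 []) h1
    simpa [PySem.List.pyGetD, PySem.List.pyGet?, PySem.List.pyIdx?] using this
  rw [hA]
  -- B side: head of the stable sort = the same running minimum
  have hB : PySem.List.pyGetD
      (PySem.List.sorted (u :: t) (fun row => PySem.List.pyGetD row 3 "")) 0 [] =
      t.foldl (fun m x =>
        if PySem.List.pyGetD x 3 "" < PySem.List.pyGetD m 3 "" then x else m) u := by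
    have hh := head?_sorted_eq_min? (fun row => PySem.List.pyGetD row 3 "") (u :: t)
    have hmin : PySem.List.min? (u :: t) (fun row => PySem.List.pyGetD row 3 "") =
        some (t.foldl (fun m x =>
          if PySem.List.pyGetD x 3 "" < PySem.List.pyGetD m 3 "" then x else m) u) := by
      unfold PySem.List.min?
      rw [List.foldl_cons]
      exact foldl_min_step (fun row => PySem.List.pyGetD row 3 "") t u
    rw [hmin] at hh
    cases hs : PySem.List.sorted (u :: t) (fun row => PySem.List.pyGetD row 3 "") with
    | nil => rw [hs] at hh; simp at hh
    | cons a b =>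
        rw [hs] at hh
        simp only [List.head?_cons, Option.some.injEq] at hh
        simp [PySem.List.pyGetD, PySem.List.pyGet?, PySem.List.pyIdx?, hh]
  rw [hB]
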